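-- pv_equiv track=rewrite | github.com/Olga-Toporova/Python_Pr_homework_6 | homework_s6_t3.py | create_dictionary
-- ===== SOURCE A (Python) =====
-- def create_dictionary(list_keys, list_evaluation):
--     dic = {}
--     for i in range(len(list_evaluation)):
--         k = list_keys[i]
--         if k not in dic:
--             dic[k] = list_evaluation[i]
--         else: dic[k] += f', {list_evaluation[i]}'
--     return dic
-- ===== SOURCE B (Python) =====
-- def create_dictionary(list_keys, list_evaluation):
--     groups = {}
--     for i in range(len(list_evaluation)):
--         groups.setdefault(list_keys[i], []).append(list_evaluation[i])
--     return {k: ", ".join(vs) for k, vs in groups.items()}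
-- ===== Notes on version B (the rewrite author's own statement) =====
-- stated objective: alternative
-- what changed: B splits the work into two passes: first it groups the values per key into lists (setdefault/append), then it builds the result by joining each group with ', '; A instead mutates the result strings in place with += inside one loop.
import Mathlib
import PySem

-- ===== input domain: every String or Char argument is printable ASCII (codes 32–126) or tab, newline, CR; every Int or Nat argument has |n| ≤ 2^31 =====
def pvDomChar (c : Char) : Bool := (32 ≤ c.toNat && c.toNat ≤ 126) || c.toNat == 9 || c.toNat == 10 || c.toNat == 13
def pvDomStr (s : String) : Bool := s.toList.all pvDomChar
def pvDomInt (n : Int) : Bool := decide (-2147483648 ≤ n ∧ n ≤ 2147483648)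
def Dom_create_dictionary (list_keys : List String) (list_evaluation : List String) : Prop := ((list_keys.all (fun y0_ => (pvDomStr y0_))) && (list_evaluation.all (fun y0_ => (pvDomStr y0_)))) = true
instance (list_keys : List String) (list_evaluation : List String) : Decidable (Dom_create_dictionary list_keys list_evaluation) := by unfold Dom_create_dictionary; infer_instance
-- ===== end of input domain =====

-- B groups the values per key into lists in a first pass and joins each group with ", " in a
-- second pass, instead of A's single loop that extends the result strings in place with +=.

-- ===== PORT A =====
-- one loop over i in range(len(list_evaluation)); dic[k] += f', {v}' is modify with ++
def create_dictionary (list_keys : List String) (list_evaluation : List String) : List (String × String) :=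
  ((PySem.List.pyRange 0 list_evaluation.length 1).foldl
    (fun dic i =>
      let k := PySem.List.pyGetD list_keys i ""
      if dic.contains k = false then
        dic.insert k (PySem.List.pyGetD list_evaluation i "")
      else
        dic.modify k "" (fun s => s ++ ", " ++ PySem.List.pyGetD list_evaluation i ""))
    PySem.Dict.empty).items

-- ===== PORT B =====
-- pass 1: groups.setdefault(list_keys[i], []).append(list_evaluation[i]) = modify with ++ [v]
-- pass 2: {k: ", ".join(vs) for k, vs in groups.items()}
def create_dictionary_alt (list_keys : List String) (list_evaluation : List String) : List (String × String) :=
  let groups : PySem.Dict String (List String) :=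
    (PySem.List.pyRange 0 list_evaluation.length 1).foldl
      (fun g i =>
        g.modify (PySem.List.pyGetD list_keys i "") []
          (fun vs => vs ++ [PySem.List.pyGetD list_evaluation i ""]))
      PySem.Dict.empty
  groups.items.map (fun p => (p.1, PySem.Str.join ", " p.2))

-- ===== PRECONDITION & SPEC =====
-- Pre_ excludes exactly the inputs where A raises IndexError: list_keys shorter than list_evaluation.
def Pre_create_dictionary (list_keys : List String) (list_evaluation : List String) : Prop :=
  list_evaluation.length ≤ list_keys.length
instance (list_keys : List String) (list_evaluation : List String) : Decidable (Pre_create_dictionary list_keys list_evaluation) := by unfold Pre_create_dictionary; infer_instance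
def pvWitness_create_dictionary : List String × List String := (["a", "b", "a"], ["1", "2", "3"])

def Spec_create_dictionary (list_keys : List String) (list_evaluation : List String) (out : List (String × String)) : Prop := out = create_dictionary_alt list_keys list_evaluation
instance (list_keys : List String) (list_evaluation : List String) (out : List (String × String)) : Decidable (Spec_create_dictionary list_keys list_evaluation out) := by unfold Spec_create_dictionary; infer_instance

-- ===== CLAIM (what is proved, stated in full; the proofs are below) =====
def Claim_equal_create_dictionary : Prop := ∀ (list_keys : List String) (list_evaluation : List String), Dom_create_dictionary list_keys list_evaluation → Pre_create_dictionary list_keys list_evaluation → Spec_create_dictionary list_keys list_evaluation (create_dictionary list_keys list_evaluation)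

-- ===== LEMMAS AND PROOFS =====

theorem pvJoin_singleton (v : String) : PySem.Str.join ", " [v] = v := by
  simp [PySem.Str.join, PySem.Chars.join, List.intercalate]

-- ", ".join over a cons-cons list peels one separator
theorem pvIntercalate_append {α : Type} (sep x : List α) :
    ∀ (ls : List (List α)), ls ≠ [] →
      List.intercalate sep (ls ++ [x]) = List.intercalate sep ls ++ sep ++ x := by
  intro ls
  induction ls with
  | nil => simp
  | cons a ls ih =>
    intro _
    cases ls with
    | nil => simp [List.intercalate]
    | cons b ls' =>
      have step : ∀ (l : List (List α)),
          sep.intercalate (a :: b :: l) = a ++ sep ++ sep.intercalate (b :: l) := by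
        intro l; simp [List.intercalate, List.intersperse]
      rw [List.cons_append, List.cons_append, step (ls' ++ [x]), ← List.cons_append,
        ih (by simp), step ls']
      simp [List.append_assoc]

theorem pvJoin_append (vs : List String) (v : String) (h : vs ≠ []) :
    PySem.Str.join ", " (vs ++ [v]) = PySem.Str.join ", " vs ++ ", " ++ v := by
  simp only [PySem.Str.join, List.map_append, List.map_cons, List.map_nil, PySem.Chars.join]
  rw [pvIntercalate_append _ _ _ (by simpa using h)]
  rw [String.ofList_append, String.ofList_append, String.ofList_toList,
    String.ofList_toList]

-- the index loop over range(len(le)) with lk[i], le[i] is a fold over lk.zip le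
theorem pvFold_zip {σ : Type} (f : σ → String → String → σ) :
    ∀ (le lk : List String), le.length ≤ lk.length → ∀ (init : σ),
      (List.range le.length).foldl (fun s k => f s (lk.getD k "") (le.getD k "")) init
        = (lk.zip le).foldl (fun s p => f s p.1 p.2) init := by
  intro le
  induction le with
  | nil => intro lk h init; simp
  | cons v le' ih =>
    intro lk h init
    cases lk with
    | nil => simp at h
    | cons x lk' =>
      simp only [List.length_cons, List.range_succ_eq_map, List.foldl_cons, List.foldl_map,
        List.getD_cons_zero, List.getD_cons_succ, List.zip_cons_cons, Nat.succ_eq_add_one]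
      exact ih lk' (by simpa using h) (f init x v)

-- loop invariant: A's dict is the ", "-join image of B's grouping dict
theorem pvLoop_inv :
    ∀ (l : List (String × String)) (dA : PySem.Dict String String)
      (g : PySem.Dict String (List String)),
      dA.items = g.items.map (fun p => (p.1, PySem.Str.join ", " p.2)) →
      (∀ p ∈ g.items, p.2 ≠ []) →
      (l.foldl (fun dic p =>
          if dic.contains p.1 = false then dic.insert p.1 p.2
          else dic.modify p.1 "" (fun s => s ++ ", " ++ p.2)) dA).items
        = ((l.foldl (fun g' p => g'.modify p.1 [] (fun vs => vs ++ [p.2])) g).items).map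
            (fun p => (p.1, PySem.Str.join ", " p.2)) := by
  intro l
  induction l with
  | nil => intro dA g hinv hne; simpa using hinv
  | cons kv l ih =>
    intro dA g hinv hne
    obtain ⟨k, v⟩ := kv
    have hcont : dA.contains k = g.contains k := by
      simp only [PySem.Dict.contains, hinv, List.any_map]
      rfl
    simp only [List.foldl_cons]
    by_cases hc : g.contains k = true
    · -- key already present: A appends ", v" to the string, B appends v to the list
      obtain ⟨vs, hvs⟩ : ∃ vs, g.get? k = some vs := by
        have h1 := PySem.Dict.contains_eq_isSome_get? g k
        rw [hc] at h1
        exact Option.isSome_iff_exists.mp h1.symm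
      have hmem : (k, vs) ∈ g.items := PySem.Dict.mem_items_of_get?_eq_some g hvs
      have hvsne : vs ≠ [] := hne _ hmem
      have hgD : g.getD k [] = vs := by simp [PySem.Dict.getD_eq_get?_getD, hvs]
      obtain ⟨q, hq, hq2⟩ : ∃ q, List.find? (fun p => p.1 == k) g.items = some q ∧ q.2 = vs := by
        have h2 := hvs
        simp only [PySem.Dict.get?, Option.map_eq_some_iff] at h2
        obtain ⟨q, hq1, hq2⟩ := h2
        exact ⟨q, hq1, hq2⟩
      have hdD : dA.getD k "" = PySem.Str.join ", " vs := by
        simp [PySem.Dict.getD_eq_get?_getD, PySem.Dict.get?, hinv, List.find?_map,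
          Function.comp_def, hq, hq2]
      rw [if_neg (by rw [hcont, hc]; simp)]
      have hstepA : dA.modify k "" (fun s => s ++ ", " ++ v)
          = dA.insert k (PySem.Str.join ", " vs ++ ", " ++ v) := by
        simp [PySem.Dict.modify, hdD]
      have hstepB : g.modify k [] (fun vs' => vs' ++ [v]) = g.insert k (vs ++ [v]) := by
        simp [PySem.Dict.modify, hgD]
      rw [hstepA, hstepB]
      apply ih
      · rw [PySem.Dict.items_insert_of_contains dA _ (by rw [hcont, hc]),
          PySem.Dict.items_insert_of_contains g _ hc, hinv, List.map_map, List.map_map]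
        apply List.map_congr_left
        intro p hp
        by_cases hpk : p.1 = k
        · simp [hpk, pvJoin_append vs v hvsne]
        · simp [hpk]
      · intro p hp
        rw [PySem.Dict.items_insert_of_contains g _ hc] at hp
        obtain ⟨q, hq', hq''⟩ := List.mem_map.mp hp
        by_cases hqk : (q.1 == k) = true
        · rw [if_pos hqk] at hq''; subst hq''; simp [hvsne]
        · rw [if_neg hqk] at hq''; subst hq''; exact hne _ hq'
    · have hc' : g.contains k = false := by simpa using hc
      rw [if_pos (by rw [hcont, hc'])]
      have hstepB : (g.modify k [] (fun vs => vs ++ [v])) = g.insert k [v] := by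
        simp [PySem.Dict.modify, PySem.Dict.getD_of_not_contains g [] hc']
      rw [hstepB]
      apply ih
      · rw [PySem.Dict.items_insert_of_not_contains dA v (by rw [hcont, hc']),
          PySem.Dict.items_insert_of_not_contains g [v] hc', List.map_append, hinv,
          List.map_cons, List.map_nil, pvJoin_singleton]
      · intro p hp
        rw [PySem.Dict.items_insert_of_not_contains g [v] hc'] at hp
        rcases List.mem_append.mp hp with h1 | h2
        · exact hne _ h1
        · rw [List.mem_singleton] at h2; subst h2; simp

-- ===== VERDICT (by name: the statement is the Claim_ definition above) =====
theorem create_dictionary_spec : Claim_equal_create_dictionary := by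
  intro lk le _ hpre
  unfold Spec_create_dictionary create_dictionary create_dictionary_alt
  rw [PySem.List.pyRange_one]
  simp only [zero_add, Int.sub_zero, Int.toNat_natCast, List.foldl_map,
    PySem.List.pyGetD_natCast]
  have hA := pvFold_zip (fun (dic : PySem.Dict String String) k v =>
        if dic.contains k = false then dic.insert k v
        else dic.modify k "" (fun s => s ++ ", " ++ v)) le lk hpre PySem.Dict.empty
  have hB := pvFold_zip (fun (g' : PySem.Dict String (List String)) k v =>
        g'.modify k [] (fun vs => vs ++ [v])) le lk hpre PySem.Dict.empty
  simp only at hA hB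
  rw [hA, hB]
  exact pvLoop_inv (lk.zip le) PySem.Dict.empty PySem.Dict.empty (by simp [PySem.Dict.empty])
    (by simp [PySem.Dict.empty])
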